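-- pv_equiv track=rewrite | github.com/swathipathaikara/InformationRetrieval | docSearchInvertedIndex.py | or_postings
-- ===== SOURCE A (Python) =====
-- def or_postings(posting1, posting2):
--     p1 = 0
--     p2 = 0
--     result = list()
--     posting1.sort()
--     posting2.sort()
--     while p1 < len(posting1) and p2 < len(posting2):
--         if(posting1[p1] == posting2[p2]):
--             result.append(posting1[p1])
--             p1 += 1
--             p2 += 1
--         elif posting1[p1] > posting2[p2]:
--             result.append(posting2[p2])
--             p2 += 1
--         else:
--             result.append(posting1[p1])
--             p1 += 1
--     while p1 < len(posting1):
--         result.append(posting1[p1])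
--         p1 += 1
--     while p2 < len(posting2):
--         result.append(posting2[p2])
--         p2 += 1
--     return result
-- ===== SOURCE B (Python) =====
-- def or_postings(posting1, posting2):
--     posting1.sort()
--     posting2.sort()
--     remaining = {}
--     for x in posting1:
--         remaining[x] = remaining.get(x, 0) + 1
--     extras = []
--     for x in posting2:
--         if remaining.get(x, 0) > 0:
--             remaining[x] -= 1
--         else:
--             extras.append(x)
--     return sorted(posting1 + extras)
-- ===== Notes on version B (the rewrite author's own statement) =====
-- stated objective: alternative
-- what changed: Replaces A's two-pointer merge of the two sorted lists by a count-and-decrement pass: a dict of remaining multiplicities from posting1, a single scan of posting2 collecting the occurrences exceeding those counts, then one final sort of posting1 + extras.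
import Mathlib
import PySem

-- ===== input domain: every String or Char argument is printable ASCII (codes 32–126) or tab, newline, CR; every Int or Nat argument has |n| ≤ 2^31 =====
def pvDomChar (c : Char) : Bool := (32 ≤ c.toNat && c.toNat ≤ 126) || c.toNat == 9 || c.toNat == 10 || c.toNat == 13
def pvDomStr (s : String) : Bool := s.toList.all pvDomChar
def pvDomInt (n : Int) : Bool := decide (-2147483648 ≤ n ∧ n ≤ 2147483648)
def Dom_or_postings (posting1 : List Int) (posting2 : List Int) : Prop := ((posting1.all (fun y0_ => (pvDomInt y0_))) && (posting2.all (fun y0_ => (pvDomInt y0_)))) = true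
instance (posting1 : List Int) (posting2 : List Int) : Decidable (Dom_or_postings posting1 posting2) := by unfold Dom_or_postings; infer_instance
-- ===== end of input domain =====

-- B replaces A's two-pointer merge by a count-and-decrement pass (dict of remaining
-- multiplicities from posting1, extras collected from posting2) followed by one sort;
-- objective: alternative. Both A and B sort their arguments in place (Python-side
-- mutation); the equivalence proved here is about the return value.

-- ===== PORT A =====
-- the merging while-loop of A: state = the unconsumed suffixes of the two sorted lists
def orMergeA : List Int → List Int → List Int
  | [], ys => ys
  | x :: xs, [] => x :: xs
  | x :: xs, y :: ys =>
    if x == y then x :: orMergeA xs ys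
    else if x > y then y :: orMergeA (x :: xs) ys
    else x :: orMergeA xs (y :: ys)

def or_postings (posting1 : List Int) (posting2 : List Int) : List Int :=
  let p1 := PySem.List.sorted posting1 (fun x => x) false
  let p2 := PySem.List.sorted posting2 (fun x => x) false
  orMergeA p1 p2

-- ===== PORT B =====
-- the loop over posting2: state = (remaining counts, extras)
def orStepB (s : PySem.Dict Int Int × List Int) (x : Int) : PySem.Dict Int Int × List Int :=
  if s.1.getD x 0 > 0 then (s.1.insert x (s.1.getD x 0 - 1), s.2)
  else (s.1, s.2 ++ [x])

def or_postings_alt (posting1 : List Int) (posting2 : List Int) : List Int :=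
  let p1 := PySem.List.sorted posting1 (fun x => x) false
  let p2 := PySem.List.sorted posting2 (fun x => x) false
  let remaining := p1.foldl (fun d x => d.insert x (d.getD x 0 + 1)) PySem.Dict.empty
  let st := p2.foldl orStepB (remaining, [])
  PySem.List.sorted (p1 ++ st.2) (fun x => x) false

-- ===== PRECONDITION & SPEC =====
def Spec_or_postings (posting1 : List Int) (posting2 : List Int) (out : List Int) : Prop := out = or_postings_alt posting1 posting2
instance (posting1 : List Int) (posting2 : List Int) (out : List Int) : Decidable (Spec_or_postings posting1 posting2 out) := by unfold Spec_or_postings; infer_instance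

-- ===== CLAIM (what is proved, stated in full; the proofs are below) =====
def Claim_equal_or_postings : Prop := ∀ (posting1 : List Int) (posting2 : List Int), Dom_or_postings posting1 posting2 → Spec_or_postings posting1 posting2 (or_postings posting1 posting2)

-- ===== LEMMAS AND PROOFS =====

-- branch equations of orMergeA
lemma orMergeA_eq (x y : Int) (xs ys : List Int) (h : x = y) :
    orMergeA (x :: xs) (y :: ys) = x :: orMergeA xs ys := by
  simp [orMergeA, h]

lemma orMergeA_gt (x y : Int) (xs ys : List Int) (h : y < x) :
    orMergeA (x :: xs) (y :: ys) = y :: orMergeA (x :: xs) ys := by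
  simp only [orMergeA]
  rw [if_neg (by simp; omega), if_pos (by omega)]

lemma orMergeA_lt (x y : Int) (xs ys : List Int) (h : x < y) :
    orMergeA (x :: xs) (y :: ys) = x :: orMergeA xs (y :: ys) := by
  simp only [orMergeA]
  rw [if_neg (by simp; omega), if_neg (by omega)]

lemma orMergeA_mem (xs ys : List Int) (a : Int) (ha : a ∈ orMergeA xs ys) :
    a ∈ xs ∨ a ∈ ys := by
  induction xs, ys using orMergeA.induct with
  | case1 ys => exact Or.inr (by simpa [orMergeA] using ha)
  | case2 x xs => exact Or.inl (by simpa [orMergeA] using ha)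
  | case3 x xs y ys heq ih =>
    rw [orMergeA_eq x y xs ys (by simpa using heq)] at ha
    rcases List.mem_cons.mp ha with h | h
    · subst h; simp
    · rcases ih h with h2 | h2 <;> simp [h2]
  | case4 x xs y ys heq hgt ih =>
    rw [orMergeA_gt x y xs ys (by simp at heq; omega)] at ha
    rcases List.mem_cons.mp ha with h | h
    · subst h; simp
    · rcases ih h with h2 | h2
      · rcases List.mem_cons.mp h2 with h3 | h3 <;> simp [h3]
      · simp [h2]
  | case5 x xs y ys heq hgt ih =>
    rw [orMergeA_lt x y xs ys (by simp at heq; omega)] at ha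
    rcases List.mem_cons.mp ha with h | h
    · subst h; simp
    · rcases ih h with h2 | h2
      · simp [h2]
      · rcases List.mem_cons.mp h2 with h3 | h3 <;> simp [h3]

-- a sorted list whose head exceeds y contains no y
lemma count_eq_zero_of_lt_head (x y : Int) (xs : List Int)
    (hs : (x :: xs).Pairwise (· ≤ ·)) (hyx : y < x) : (x :: xs).count y = 0 := by
  rw [List.count_eq_zero]
  intro hmem
  rcases List.mem_cons.mp hmem with h | h
  · omega
  · have := (List.pairwise_cons.mp hs).1 y h; omega

lemma orMergeA_pairwise (xs ys : List Int)
    (hx : xs.Pairwise (· ≤ ·)) (hy : ys.Pairwise (· ≤ ·)) :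
    (orMergeA xs ys).Pairwise (· ≤ ·) := by
  induction xs, ys using orMergeA.induct with
  | case1 ys => simpa [orMergeA] using hy
  | case2 x xs => simpa [orMergeA] using hx
  | case3 x xs y ys heq ih =>
    have hx' := List.pairwise_cons.mp hx
    have hy' := List.pairwise_cons.mp hy
    have hxy : x = y := by simpa using heq
    rw [orMergeA_eq x y xs ys hxy]
    refine List.pairwise_cons.mpr ⟨?_, ih hx'.2 hy'.2⟩
    intro a ha
    rcases orMergeA_mem xs ys a ha with h | h
    · exact hx'.1 a h
    · exact hxy ▸ hy'.1 a h
  | case4 x xs y ys heq hgt ih =>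
    have hx' := List.pairwise_cons.mp hx
    have hy' := List.pairwise_cons.mp hy
    have hyx : y < x := by simp at heq hgt; omega
    rw [orMergeA_gt x y xs ys hyx]
    refine List.pairwise_cons.mpr ⟨?_, ih hx hy'.2⟩
    intro a ha
    rcases orMergeA_mem (x :: xs) ys a ha with h | h
    · rcases List.mem_cons.mp h with h1 | h1
      · omega
      · have := hx'.1 a h1; omega
    · exact hy'.1 a h
  | case5 x xs y ys heq hgt ih =>
    have hx' := List.pairwise_cons.mp hx
    have hy' := List.pairwise_cons.mp hy
    have hxy : x < y := by simp at heq hgt; omega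
    rw [orMergeA_lt x y xs ys hxy]
    refine List.pairwise_cons.mpr ⟨?_, ih hx'.2 hy⟩
    intro a ha
    rcases orMergeA_mem xs (y :: ys) a ha with h | h
    · exact hx'.1 a h
    · rcases List.mem_cons.mp h with h1 | h1
      · omega
      · have := hy'.1 a h1; omega

lemma orMergeA_count (xs ys : List Int)
    (hx : xs.Pairwise (· ≤ ·)) (hy : ys.Pairwise (· ≤ ·)) (z : Int) :
    (orMergeA xs ys).count z = max (xs.count z) (ys.count z) := by
  induction xs, ys using orMergeA.induct with
  | case1 ys => simp [orMergeA]
  | case2 x xs => simp [orMergeA]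
  | case3 x xs y ys heq ih =>
    have hxy : x = y := by simpa using heq
    have hx' := List.pairwise_cons.mp hx
    have hy' := List.pairwise_cons.mp hy
    rw [orMergeA_eq x y xs ys hxy, List.count_cons, List.count_cons, List.count_cons,
      ih hx'.2 hy'.2]
    subst hxy
    by_cases hzx : x = z <;> simp [hzx] <;> omega
  | case4 x xs y ys heq hgt ih =>
    have hyx : y < x := by simp at heq hgt; omega
    have hy' := List.pairwise_cons.mp hy
    rw [orMergeA_gt x y xs ys hyx, List.count_cons, ih hx hy'.2, List.count_cons]
    by_cases hzy : y = z
    · subst hzy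
      have h0 : (x :: xs).count y = 0 := count_eq_zero_of_lt_head x y xs hx hyx
      have hne : ¬ x = y := by omega
      simp [List.count_cons, hne] at h0 ⊢; omega
    · simp [hzy]
  | case5 x xs y ys heq hgt ih =>
    have hxy : x < y := by simp at heq hgt; omega
    have hx' := List.pairwise_cons.mp hx
    rw [orMergeA_lt x y xs ys hxy, List.count_cons, ih hx'.2 hy, List.count_cons]
    by_cases hzx : x = z
    · subst hzx
      have h0 : (y :: ys).count x = 0 := count_eq_zero_of_lt_head y x ys hy hxy
      have hne : ¬ y = x := by omega
      simp [List.count_cons, hne] at h0 ⊢; omega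
    · simp [hzx]

-- invariant of B's loop over posting2: the extras gather max 0 (count l z - remaining z)
lemma orStepB_foldl_count (l : List Int) (d : PySem.Dict Int Int) (e : List Int) (z : Int) :
    (((l.foldl orStepB (d, e)).2.count z : Int)) =
      (e.count z : Int) + max 0 ((l.count z : Int) - max (d.getD z 0) 0) := by
  induction l generalizing d e with
  | nil => simp
  | cons x t ih =>
    simp only [List.foldl_cons]
    by_cases hpos : d.getD x 0 > 0
    · simp only [orStepB, hpos, if_pos]
      rw [ih, List.count_cons]
      by_cases hzx : z = x
      · subst hzx
        rw [PySem.Dict.getD_insert, if_pos rfl]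
        simp; omega
      · rw [PySem.Dict.getD_insert, if_neg hzx]
        simp [Ne.symm hzx]
    · simp only [orStepB, hpos, if_false]
      rw [ih, List.count_cons, List.count_append, List.count_cons, List.count_nil]
      by_cases hzx : z = x
      · subst hzx
        simp at hpos ⊢
        omega
      · simp [Ne.symm hzx]

lemma or_postings_alt_count (posting1 posting2 : List Int) (z : Int) :
    ((or_postings_alt posting1 posting2).count z) =
      max ((PySem.List.sorted posting1 (fun x => x) false).count z)
          ((PySem.List.sorted posting2 (fun x => x) false).count z) := by
  unfold or_postings_alt
  rw [List.Perm.count_eq (PySem.List.sorted_perm _ _ _), List.count_append]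
  have h1 := orStepB_foldl_count (PySem.List.sorted posting2 (fun x => x) false)
      ((PySem.List.sorted posting1 (fun x => x) false).foldl
        (fun d x => d.insert x (d.getD x 0 + 1)) PySem.Dict.empty) [] z
  rw [PySem.Dict.getD_foldl_insert_add_one, PySem.Dict.getD_empty] at h1
  simp only [List.count_nil] at h1
  omega

-- ===== VERDICT (by name: the statement is the Claim_ definition above) =====
theorem or_postings_spec : Claim_equal_or_postings := by
  intro posting1 posting2 _
  unfold Spec_or_postings
  have hA : (or_postings posting1 posting2).Pairwise (· ≤ ·) :=
    orMergeA_pairwise _ _ (PySem.List.sorted_pairwise _ _) (PySem.List.sorted_pairwise _ _)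
  have hB : (or_postings_alt posting1 posting2).Pairwise (· ≤ ·) := by
    unfold or_postings_alt
    exact PySem.List.sorted_pairwise _ _
  have hcount : ∀ z, (or_postings posting1 posting2).count z
      = (or_postings_alt posting1 posting2).count z := by
    intro z
    rw [or_postings_alt_count]
    exact orMergeA_count _ _ (PySem.List.sorted_pairwise _ _)
      (PySem.List.sorted_pairwise _ _) z
  have hperm : (or_postings posting1 posting2).Perm (or_postings_alt posting1 posting2) :=
    List.perm_iff_count.mpr hcount
  exact hperm.eq_of_pairwise (fun a b _ _ => le_antisymm) hA hB
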